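-- pv_equiv track=rewrite | github.com/Kontowicz/Daily-Interview-Pro | solutions/day_101.py | desc
-- ===== SOURCE A (Python) =====
-- def desc(n):
--     digits = []
--     while (n > 0):
--         dig = n % 10
--         if dig != 0:
--             digits.append(dig)
--         n = n // 10
--
--     digits.sort(reverse=True)
--
--     if len(digits) < 4:
--         padding = 4 - len(digits)
--         digits = digits + [0] * padding
--
--     to_return = 0
--     multiply = 1
--     for item in range(0, len(digits) - 1):
--         multiply *= 10
--
--     for item in digits:
--         to_return += item * multiply
--         multiply = multiply // 10
--     return to_return
-- ===== SOURCE B (Python) =====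
-- def desc(n):
--     counts = [0] * 10
--     while n > 0:
--         counts[n % 10] += 1
--         n //= 10
--     nonzero = sum(counts[1:])
--     val = 0
--     for d in range(9, 0, -1):
--         for _ in range(counts[d]):
--             val = val * 10 + d
--     return val * 10 ** max(0, 4 - nonzero)
-- ===== Notes on version B (the rewrite author's own statement) =====
-- stated objective: alternative
-- what changed: B replaces A's digit list, comparison sort and place-value reassembly (precomputed power, per-item division) with a counting-sort digit histogram, a Horner-style rebuild scanning the histogram from the highest digit downwards, and padding done arithmetically as a single multiplication by a power of ten.
import Mathlib
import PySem

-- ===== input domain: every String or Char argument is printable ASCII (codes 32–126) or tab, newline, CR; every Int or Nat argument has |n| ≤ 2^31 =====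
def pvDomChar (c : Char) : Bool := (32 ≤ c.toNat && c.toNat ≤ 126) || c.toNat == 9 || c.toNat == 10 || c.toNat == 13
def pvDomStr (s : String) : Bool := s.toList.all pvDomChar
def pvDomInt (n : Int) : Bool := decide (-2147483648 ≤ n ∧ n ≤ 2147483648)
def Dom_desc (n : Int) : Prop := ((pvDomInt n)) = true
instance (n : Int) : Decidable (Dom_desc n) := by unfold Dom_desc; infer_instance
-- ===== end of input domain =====

-- B replaces A's digit list + comparison sort + place-value reassembly with a digit
-- histogram (counting sort), a Horner rebuild from 9 down to 1, and arithmetic padding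
-- by one power of 10 (objective: alternative algorithm, same exact results).

-- termination helper for both while-loops (n //= 10 strictly shrinks a positive n)
theorem pvFloordivTenLt (n : Int) (h : 0 < n) : (PySem.Int.floordiv n 10).toNat < n.toNat := by
  rw [PySem.Int.floordiv_eq_ediv_of_pos (by norm_num)]
  have h1 : n / 10 < n := Int.ediv_lt_of_lt_mul (by norm_num) (by omega)
  have h2 : 0 ≤ n / 10 := Int.ediv_nonneg h.le (by norm_num)
  omega

-- ===== PORT A =====
-- while n > 0: dig = n % 10; if dig != 0: digits.append(dig); n //= 10
def descLoop (n : Int) (digits : List Int) : List Int :=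
  if h : 0 < n then
    descLoop (PySem.Int.floordiv n 10)
      (if PySem.Int.mod n 10 ≠ 0 then digits ++ [PySem.Int.mod n 10] else digits)
  else digits
termination_by n.toNat
decreasing_by exact pvFloordivTenLt n h

def desc (n : Int) : Int :=
  let digits0 := descLoop n []
  let digits1 := PySem.List.sorted digits0 (fun x => x) true
  -- if len(digits) < 4: digits = digits + [0] * (4 - len(digits))
  let digits2 := if digits1.length < 4 then digits1 ++ List.replicate (4 - digits1.length) 0 else digits1
  -- for item in range(0, len(digits) - 1): multiply *= 10
  let multiply := (PySem.List.pyRange 0 ((digits2.length : Int) - 1) 1).foldl (fun m _ => m * 10) 1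
  -- for item in digits: to_return += item * multiply; multiply //= 10
  (digits2.foldl (fun (p : Int × Int) item => (p.1 + item * p.2, PySem.Int.floordiv p.2 10)) ((0 : Int), multiply)).1

-- ===== PORT B =====
-- while n > 0: counts[n % 10] += 1; n //= 10   (index n % 10 is always in 0..9, so .toNat is exact)
def countLoop (n : Int) (counts : List Int) : List Int :=
  if h : 0 < n then
    countLoop (PySem.Int.floordiv n 10)
      (counts.set (PySem.Int.mod n 10).toNat (counts.getD (PySem.Int.mod n 10).toNat 0 + 1))
  else counts
termination_by n.toNat
decreasing_by exact pvFloordivTenLt n h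

-- for _ in range(counts[d]): val = val * 10 + d
def repHorner (v d : Int) : Nat → Int
  | 0 => v
  | k + 1 => repHorner (v * 10 + d) d k

def desc_alt (n : Int) : Int :=
  let counts := countLoop n (List.replicate 10 0)
  -- nonzero = sum(counts[1:])  (counts has length 10, so the slice is drop 1)
  let nonzero := (counts.drop 1).sum
  -- for d in range(9, 0, -1): … counts[d] is a positive in-range index, so .toNat is exact
  let val := (PySem.List.pyRange 9 0 (-1)).foldl
      (fun v d => repHorner v d (counts.getD d.toNat 0).toNat) 0
  val * 10 ^ (max 0 (4 - nonzero)).toNat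

-- ===== PRECONDITION & SPEC =====
def Spec_desc (n : Int) (out : Int) : Prop := out = desc_alt n
instance (n : Int) (out : Int) : Decidable (Spec_desc n out) := by unfold Spec_desc; infer_instance

-- ===== CLAIM (what is proved, stated in full; the proofs are below) =====
def Claim_equal_desc : Prop := ∀ (n : Int), Dom_desc n → Spec_desc n (desc n)

-- ===== LEMMAS AND PROOFS =====

-- Horner evaluation: the common value both reassembly loops compute
def pvH (v : Int) (l : List Int) : Int := l.foldl (fun a x => a * 10 + x) v

theorem pvH_append (v : Int) (l1 l2 : List Int) : pvH v (l1 ++ l2) = pvH (pvH v l1) l2 := by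
  simp [pvH]

theorem pvH_shift (l : List Int) : ∀ v : Int, pvH v l = v * 10 ^ l.length + pvH 0 l := by
  induction l with
  | nil => intro v; simp [pvH]
  | cons x t ih =>
    intro v
    show pvH (v * 10 + x) t = v * 10 ^ (x :: t).length + pvH (0 * 10 + x) t
    rw [ih (v * 10 + x), ih (0 * 10 + x)]
    simp [pow_succ]; ring

theorem pvH_replicate_zero (k : Nat) : ∀ v : Int, pvH v (List.replicate k 0) = v * 10 ^ k := by
  induction k with
  | zero => intro v; simp [pvH]
  | succ k ih =>
    intro v
    show pvH (v * 10 + 0) (List.replicate k 0) = v * 10 ^ (k + 1)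
    rw [ih (v * 10 + 0)]; ring

theorem pvRepHorner (d : Int) : ∀ (k : Nat) (v : Int), repHorner v d k = pvH v (List.replicate k d) := by
  intro k
  induction k with
  | zero => intro v; simp [repHorner, pvH]
  | succ k ih =>
    intro v
    show repHorner (v * 10 + d) d k = pvH v (d :: List.replicate k d)
    rw [ih (v * 10 + d)]; rfl

theorem pvMulFold (l : List Int) : ∀ i : Int, l.foldl (fun m _ => m * 10) i = i * 10 ^ l.length := by
  induction l with
  | nil => intro i; simp
  | cons x t ih => intro i; rw [List.foldl_cons, ih (i * 10)]; rw [List.length_cons, pow_succ]; ring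

theorem pvFlatFold (f : Int → Nat) (ds : List Int) :
    ∀ v : Int, ds.foldl (fun v d => repHorner v d (f d)) v
      = pvH v (ds.flatMap (fun d => List.replicate (f d) d)) := by
  induction ds with
  | nil => intro v; simp [pvH]
  | cons d t ih =>
    intro v
    rw [List.foldl_cons, ih (repHorner v d (f d)), List.flatMap_cons, pvH_append,
      pvRepHorner d (f d) v]

theorem pvPlace (l : List Int) : ∀ s : Int, l ≠ [] →
    (l.foldl (fun (p : Int × Int) item => (p.1 + item * p.2, PySem.Int.floordiv p.2 10))
      (s, 10 ^ (l.length - 1))).1 = s + pvH 0 l := by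
  induction l with
  | nil => intro s h; simp at h
  | cons x t ih =>
    intro s _
    cases t with
    | nil => simp [pvH]
    | cons y u =>
      have hfd : PySem.Int.floordiv ((10 : Int) ^ ((y :: u).length)) 10 = 10 ^ ((y :: u).length - 1) := by
        rw [PySem.Int.floordiv_eq_ediv_of_pos (by norm_num)]
        rw [List.length_cons, Nat.add_sub_cancel, pow_succ]
        exact Int.mul_ediv_cancel _ (by norm_num)
      rw [List.foldl_cons]
      have hlen : (x :: y :: u).length - 1 = (y :: u).length := rfl
      rw [hlen, hfd, ih (s + x * 10 ^ (y :: u).length) (by simp)]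
      rw [show pvH 0 (x :: y :: u) = pvH x (y :: u) by simp [pvH],
        pvH_shift (y :: u) x]
      ring

-- loop characterisations of port A's while-loop
theorem descLoop_base (n : Int) (h : ¬ 0 < n) (ds : List Int) : descLoop n ds = ds := by
  rw [descLoop]; simp [h]

theorem descLoop_step (n : Int) (h : 0 < n) (ds : List Int) :
    descLoop n ds = descLoop (PySem.Int.floordiv n 10)
      (if PySem.Int.mod n 10 ≠ 0 then ds ++ [PySem.Int.mod n 10] else ds) := by
  conv_lhs => rw [descLoop]
  simp [h]

theorem descLoop_acc : ∀ (k : Nat) (n : Int), n.toNat ≤ k → ∀ ds, descLoop n ds = ds ++ descLoop n [] := by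
  intro k
  induction k with
  | zero =>
    intro n hn ds
    have h : ¬ 0 < n := by omega
    rw [descLoop_base n h, descLoop_base n h]; simp
  | succ k ih =>
    intro n hn ds
    by_cases h : 0 < n
    · have hlt := pvFloordivTenLt n h
      rw [descLoop_step n h, descLoop_step n h []]
      by_cases hd : PySem.Int.mod n 10 ≠ 0
      · rw [if_pos hd, if_pos hd, ih _ (by omega) (ds ++ [PySem.Int.mod n 10]),
          ih _ (by omega) ([] ++ [PySem.Int.mod n 10])]
        simp
      · rw [if_neg hd, if_neg hd, ih _ (by omega) ds]
    · rw [descLoop_base n h, descLoop_base n h]; simp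

theorem descLoop_mem : ∀ (k : Nat) (n : Int), n.toNat ≤ k →
    ∀ x ∈ descLoop n [], 1 ≤ x ∧ x ≤ 9 := by
  intro k
  induction k with
  | zero =>
    intro n hn x hx
    rw [descLoop_base n (by omega)] at hx
    simp at hx
  | succ k ih =>
    intro n hn x hx
    by_cases h : 0 < n
    · have hlt := pvFloordivTenLt n h
      rw [descLoop_step n h] at hx
      have hm0 : 0 ≤ PySem.Int.mod n 10 := PySem.Int.mod_nonneg n (by norm_num)
      have hm1 : PySem.Int.mod n 10 < 10 := PySem.Int.mod_lt n (by norm_num)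
      by_cases hd : PySem.Int.mod n 10 ≠ 0
      · rw [if_pos hd, descLoop_acc k _ (by omega)] at hx
        rcases List.mem_append.mp hx with hx | hx
        · rcases List.mem_singleton.mp hx with rfl
          omega
        · exact ih _ (by omega) x hx
      · rw [if_neg hd] at hx
        exact ih _ (by omega) x hx
    · rw [descLoop_base n h] at hx; simp at hx

-- loop characterisations of port B's while-loop
theorem countLoop_base (n : Int) (h : ¬ 0 < n) (cs : List Int) : countLoop n cs = cs := by
  rw [countLoop]; simp [h]

theorem countLoop_step (n : Int) (h : 0 < n) (cs : List Int) :
    countLoop n cs = countLoop (PySem.Int.floordiv n 10)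
      (cs.set (PySem.Int.mod n 10).toNat (cs.getD (PySem.Int.mod n 10).toNat 0 + 1)) := by
  conv_lhs => rw [countLoop]
  simp [h]

-- the histogram counts exactly the occurrences collected by A's loop (digits 1..9)
theorem pvCount : ∀ (k : Nat) (n : Int), n.toNat ≤ k → ∀ (cs : List Int), cs.length = 10 →
    ∀ d : Nat, 1 ≤ d → d ≤ 9 →
    (countLoop n cs).getD d 0 = cs.getD d 0 + ((descLoop n []).count (d : Int) : Int) := by
  intro k
  induction k with
  | zero =>
    intro n hn cs hcs d h1 h2
    rw [countLoop_base n (by omega), descLoop_base n (by omega)]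
    simp
  | succ k ih =>
    intro n hn cs hcs d h1 h2
    by_cases h : 0 < n
    · have hlt := pvFloordivTenLt n h
      have hm0 : 0 ≤ PySem.Int.mod n 10 := PySem.Int.mod_nonneg n (by norm_num)
      have hm1 : PySem.Int.mod n 10 < 10 := PySem.Int.mod_lt n (by norm_num)
      set i := (PySem.Int.mod n 10).toNat with hi
      have hilen : i < cs.length := by omega
      rw [countLoop_step n h, descLoop_step n h, descLoop_acc k _ (by omega)]
      rw [ih _ (by omega) _ (by simp [hcs]) d h1 h2]
      have hdlen : d < cs.length := by omega
      have hset : (cs.set i (cs.getD i 0 + 1)).getD d 0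
          = (if i = d then cs.getD d 0 + 1 else cs.getD d 0) := by
        rw [List.getD_eq_getElem _ _ (by simpa using hdlen), List.getD_eq_getElem _ _ hdlen]
        rw [List.getElem_set]
        split
        · rename_i hEq; subst hEq; rw [List.getD_eq_getElem _ _ hilen]
        · rfl
      rw [hset]
      have hcnt : ((List.count ((d : Nat) : Int)
          (if PySem.Int.mod n 10 ≠ 0 then [] ++ [PySem.Int.mod n 10] else []) : Nat) : Int)
          = if i = d then 1 else 0 := by
        by_cases hd0 : PySem.Int.mod n 10 ≠ 0
        · rw [if_pos hd0]
          rw [List.nil_append]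
          by_cases hid : i = d
          · have hmd : PySem.Int.mod n 10 = ((d : Nat) : Int) := by omega
            rw [hmd, if_pos hid]
            simp
          · have hmd : PySem.Int.mod n 10 ≠ ((d : Nat) : Int) := by omega
            have hz : List.count ((d : Nat) : Int) [PySem.Int.mod n 10] = 0 :=
              List.count_eq_zero.mpr (fun hmem => hmd (List.mem_singleton.mp hmem).symm)
            rw [hz, if_neg hid]
            rfl
        · rw [if_neg hd0]
          have hid : ¬ i = d := by omega
          simp [hid]
      rw [List.count_append]
      push_cast
      rw [hcnt]
      split_ifs <;> ring
    · rw [countLoop_base n h, descLoop_base n h]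
      simp

theorem pvSumSet : ∀ (t : List Int) (k : Nat), k < t.length → ∀ x : Int,
    (t.set k x).sum = t.sum + x - t.getD k 0 := by
  intro t
  induction t with
  | nil => intro k hk; simp at hk
  | cons a t ih =>
    intro k hk x
    cases k with
    | zero => simp [List.getD]; ring
    | succ k =>
      simp only [List.set_cons_succ, List.sum_cons]
      rw [ih k (by simpa using hk) x]
      simp [List.getD]
      ring

theorem pvDropSumSet (cs : List Int) (i : Nat) (hi : i < cs.length) (x : Int) :
    ((cs.set i x).drop 1).sum = ((cs.drop 1).sum + if 1 ≤ i then x - cs.getD i 0 else 0) := by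
  cases cs with
  | nil => simp at hi
  | cons a t =>
    cases i with
    | zero => simp
    | succ k =>
      simp only [List.set_cons_succ, List.drop_one, List.tail_cons]
      rw [pvSumSet t k (by simpa using hi) x]
      simp [List.getD]
      ring

-- sum(counts[1:]) grows exactly by the number of nonzero digits A keeps
theorem pvLen : ∀ (k : Nat) (n : Int), n.toNat ≤ k → ∀ (cs : List Int), cs.length = 10 →
    ((countLoop n cs).drop 1).sum = (cs.drop 1).sum + ((descLoop n []).length : Int) := by
  intro k
  induction k with
  | zero =>
    intro n hn cs hcs
    rw [countLoop_base n (by omega), descLoop_base n (by omega)]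
    simp
  | succ k ih =>
    intro n hn cs hcs
    by_cases h : 0 < n
    · have hlt := pvFloordivTenLt n h
      have hm0 : 0 ≤ PySem.Int.mod n 10 := PySem.Int.mod_nonneg n (by norm_num)
      have hm1 : PySem.Int.mod n 10 < 10 := PySem.Int.mod_lt n (by norm_num)
      set i := (PySem.Int.mod n 10).toNat with hi
      rw [countLoop_step n h, descLoop_step n h, descLoop_acc k _ (by omega)]
      rw [ih _ (by omega) _ (by simp [hcs])]
      rw [pvDropSumSet cs i (by omega) _]
      have hli : (if PySem.Int.mod n 10 ≠ 0 then ([] : List Int) ++ [PySem.Int.mod n 10] else []).length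
          = if 1 ≤ i then 1 else 0 := by
        by_cases hd0 : PySem.Int.mod n 10 ≠ 0
        · rw [if_pos hd0]
          have : 1 ≤ i := by omega
          simp [this]
        · rw [if_neg hd0]
          have : ¬ 1 ≤ i := by omega
          simp [this]
      rw [List.length_append, hli]
      push_cast
      split_ifs <;> ring
    · rw [countLoop_base n h, descLoop_base n h]
      simp

-- B's descending blocks: replicate counts[d] of d, for d = 9 … 1
def pvBlocks (cs : List Int) : List Int :=
  (PySem.List.pyRange 9 0 (-1)).flatMap (fun d => List.replicate ((cs.getD d.toNat 0).toNat) d)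

theorem pvRange91 : PySem.List.pyRange 9 0 (-1) = [9, 8, 7, 6, 5, 4, 3, 2, 1] := by decide

theorem pvBlocks_perm (n : Int) :
    (pvBlocks (countLoop n (List.replicate 10 0))).Perm (descLoop n []) := by
  have hc : ∀ d : Nat, 1 ≤ d → d ≤ 9 →
      ((countLoop n (List.replicate 10 0)).getD d 0).toNat = (descLoop n []).count (d : Int) := by
    intro d h1 h2
    rw [pvCount n.toNat n le_rfl _ (by simp) d h1 h2]
    have : (List.replicate 10 (0 : Int)).getD d 0 = 0 := by
      interval_cases d <;> rfl
    rw [this]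
    simp
  rw [List.perm_iff_count]
  intro a
  unfold pvBlocks
  rw [pvRange91]
  by_cases ha : 1 ≤ a ∧ a ≤ 9
  · obtain ⟨ha1, ha2⟩ := ha
    interval_cases a <;>
      simp [List.count_append, List.count_replicate] <;>
      first
        | exact hc 1 (by norm_num) (by norm_num)
        | exact hc 2 (by norm_num) (by norm_num)
        | exact hc 3 (by norm_num) (by norm_num)
        | exact hc 4 (by norm_num) (by norm_num)
        | exact hc 5 (by norm_num) (by norm_num)
        | exact hc 6 (by norm_num) (by norm_num)
        | exact hc 7 (by norm_num) (by norm_num)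
        | exact hc 8 (by norm_num) (by norm_num)
        | exact hc 9 (by norm_num) (by norm_num)
  · have hnot : ∀ x ∈ descLoop n [], 1 ≤ x ∧ x ≤ 9 := descLoop_mem n.toNat n le_rfl
    have hr : (descLoop n []).count a = 0 := by
      rw [List.count_eq_zero]
      intro hmem
      exact ha (hnot a hmem)
    rw [hr]
    have h1 : ¬ ((9 : Int) = a) := by omega
    have h2 : ¬ ((8 : Int) = a) := by omega
    have h3 : ¬ ((7 : Int) = a) := by omega
    have h4 : ¬ ((6 : Int) = a) := by omega
    have h5 : ¬ ((5 : Int) = a) := by omega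
    have h6 : ¬ ((4 : Int) = a) := by omega
    have h7 : ¬ ((3 : Int) = a) := by omega
    have h8 : ¬ ((2 : Int) = a) := by omega
    have h9 : ¬ ((1 : Int) = a) := by omega
    simp [List.count_append, List.count_replicate, h1, h2, h3, h4, h5, h6, h7, h8, h9]

theorem pvBlocks_sorted (cs : List Int) : (pvBlocks cs).Pairwise (fun a b => b ≤ a) := by
  unfold pvBlocks
  rw [pvRange91, List.flatMap_def, List.pairwise_flatten]
  refine ⟨?_, ?_⟩
  · intro l hl
    simp only [List.mem_map] at hl
    obtain ⟨d, _, rfl⟩ := hl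
    exact List.pairwise_replicate.mpr (Or.inr le_rfl)
  · rw [List.pairwise_map]
    have hgt : ([9, 8, 7, 6, 5, 4, 3, 2, 1] : List Int).Pairwise (fun a b => b < a) := by decide
    refine hgt.imp ?_
    intro d e hde x hx y hy
    rw [List.eq_of_mem_replicate hx, List.eq_of_mem_replicate hy]
    exact hde.le

theorem pvSortedEq (n : Int) :
    PySem.List.sorted (descLoop n []) (fun x => x) true
      = pvBlocks (countLoop n (List.replicate 10 0)) := by
  refine List.Perm.eq_of_pairwise
    (fun a b _ _ h1 h2 => le_antisymm h2 h1)
    ?_ ?_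
    ((PySem.List.sorted_perm (descLoop n []) (fun x => x) true).trans (pvBlocks_perm n).symm)
  · exact PySem.List.sorted_pairwise_rev (descLoop n []) (fun x => x)
  · exact pvBlocks_sorted _

-- ===== VERDICT (by name: the statement is the Claim_ definition above) =====
theorem desc_spec : Claim_equal_desc := by
  intro n _
  show desc n = desc_alt n
  simp only [desc, desc_alt]
  rw [pvSortedEq n,
    pvFlatFold (fun d => ((countLoop n (List.replicate 10 0)).getD d.toNat 0).toNat)
      (PySem.List.pyRange 9 0 (-1)) 0]
  have hb : (PySem.List.pyRange 9 0 (-1)).flatMap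
      (fun d => List.replicate (((countLoop n (List.replicate 10 0)).getD d.toNat 0).toNat) d)
      = pvBlocks (countLoop n (List.replicate 10 0)) := rfl
  rw [hb]
  set C := countLoop n (List.replicate 10 0) with hC
  set B := pvBlocks C with hB
  have hsum : (C.drop 1).sum = (((descLoop n []).length : Nat) : Int) := by
    rw [hC, pvLen n.toNat n le_rfl _ (by simp)]
    norm_num
  have hlenB : B.length = (descLoop n []).length := by
    rw [hB, hC, ← pvSortedEq n]
    exact PySem.List.length_sorted (descLoop n []) (fun x => x) true
  by_cases hlen : B.length < 4
  · rw [if_pos hlen]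
    have hlen4 : (B ++ List.replicate (4 - B.length) 0).length = 4 := by
      rw [List.length_append, List.length_replicate]
      omega
    have hmul : (PySem.List.pyRange 0 ((((B ++ List.replicate (4 - B.length) 0).length : Nat) : Int) - 1) 1).foldl
        (fun m _ => m * 10) 1
        = (10 : Int) ^ ((B ++ List.replicate (4 - B.length) 0).length - 1) := by
      rw [pvMulFold, PySem.List.length_pyRange_one, one_mul]
      congr 1
      omega
    rw [hmul, pvPlace _ 0 (by intro hnil; rw [hnil] at hlen4; simp at hlen4)]
    rw [pvH_append, pvH_replicate_zero, pvH_shift]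
    rw [hsum]
    have hexp : (max 0 (4 - (((descLoop n []).length : Nat) : Int))).toNat = 4 - B.length := by
      omega
    rw [hexp]
    ring
  · rw [if_neg hlen]
    have hmul : (PySem.List.pyRange 0 (((B.length : Nat) : Int) - 1) 1).foldl
        (fun m _ => m * 10) 1 = (10 : Int) ^ (B.length - 1) := by
      rw [pvMulFold, PySem.List.length_pyRange_one, one_mul]
      congr 1
      omega
    rw [hmul, pvPlace _ 0 (by intro hnil; rw [hnil] at hlen; simp at hlen)]
    rw [hsum]
    have hexp : (max 0 (4 - (((descLoop n []).length : Nat) : Int))).toNat = 0 := by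
      omega
    rw [hexp]
    ring
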